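-- pv_equiv track=rewrite | github.com/ammar-ahmed22/lcnotes | rummy-card-game/solution.py | findMelds
-- ===== SOURCE A (Python) =====
-- from typing import List, Tuple
-- from collections import defaultdict
-- from itertools import combinations
--
-- def findMelds(cards: List[str]) -> List[List[str]]:
--     def parseCard(card: str) -> Tuple[int, str]:
--         return (int(card[0]), card[1])
--
--     # Group cards by rank and suit
--     # Space: O(n) -> all cards are stored
--     by_rank = defaultdict(list)
--     by_suit = defaultdict(list)
--     # Time: O(n)
--     for card in cards:
--         rank, suit = parseCard(card)
--         by_rank[rank].append(card)
--         by_suit[suit].append(card)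
--
--
--     result = []
--
--     # Find sets
--     for rank in by_rank:
--         rank_cards = by_rank[rank]
--         # Only care about ranks that have 3 or more cards
--         if len(rank_cards) < 3:
--             continue
--         # Create sets using combinations of 3+ cards
--         for n in range(3, len(rank_cards) + 1):
--             for combo in combinations(rank_cards, n):
--                 result.append(list(combo))
--     # Find runs
--     for suit in by_suit:
--         suit_cards = by_suit[suit]
--         # Only care about suits that have 3 or more cards
--         if len(suit_cards) < 3:
--             continue
--         # Sort cards by rank
--         ranked = sorted([(parseCard(c)[0], c) for c in suit_cards], key=lambda x: x[0])
--
--         # Build consecutive segments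
--         segments: List[Tuple[int, str]] = []
--
--         for r, c in ranked:
--             if not segments:
--                 segments.append((r, c))
--             else:
--                 prev_r = segments[-1][0]
--                 if r == prev_r + 1:
--                     segments.append((r, c))
--                 else:
--                     # Add windows of consecutive segments to result and flush
--                     if len(segments) >= 3:
--                         seg_cards = [card for _, card in segments]
--                         m = len(seg_cards)
--                         for i in range(m):
--                             for j in range(i + 3, m + 1):
--                                 result.append(seg_cards[i:j])
--                     segments = [(r, c)]
--         # Flush the any remaining segment
--         if len(segments) >= 3:
--             seg_cards = [card for _, card in segments]
--             m = len(seg_cards)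
--             for i in range(m):
--                 for j in range(i + 3, m + 1):
--                     result.append(seg_cards[i:j])
--
--     return result
-- ===== SOURCE B (Python) =====
-- from itertools import combinations
--
-- def findMelds(cards):
--     # group by rank and suit (insertion order preserved)
--     by_rank = {}
--     by_suit = {}
--     for card in cards:
--         by_rank.setdefault(int(card[0]), []).append(card)
--         by_suit.setdefault(card[1], []).append(card)
--
--     result = []
--
--     # sets: all combinations of size 3.. of each rank group
--     for group in by_rank.values():
--         for n in range(3, len(group) + 1):
--             for combo in combinations(group, n):
--                 result.append(list(combo))
--
--     # runs: scan consecutive windows directly, no segment lists materialised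
--     for group in by_suit.values():
--         ranked = sorted(group, key=lambda c: int(c[0]))
--         ranks = [int(c[0]) for c in ranked]
--         m = len(ranked)
--         for i in range(m):
--             j = i + 1
--             while j < m and ranks[j] == ranks[j - 1] + 1:
--                 j += 1
--             for k in range(i + 3, j + 1):
--                 result.append(ranked[i:k])
--     return result
-- ===== Notes on version B (the rewrite author's own statement) =====
-- stated objective: simpler
-- what changed: The runs half no longer builds maximal-segment lists with a duplicated flush block: for each start index it extends a run end pointer while ranks stay consecutive and emits the windows directly, which yields the same windows in the same order with a single loop nest and no segment buffers.
import Mathlib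
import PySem

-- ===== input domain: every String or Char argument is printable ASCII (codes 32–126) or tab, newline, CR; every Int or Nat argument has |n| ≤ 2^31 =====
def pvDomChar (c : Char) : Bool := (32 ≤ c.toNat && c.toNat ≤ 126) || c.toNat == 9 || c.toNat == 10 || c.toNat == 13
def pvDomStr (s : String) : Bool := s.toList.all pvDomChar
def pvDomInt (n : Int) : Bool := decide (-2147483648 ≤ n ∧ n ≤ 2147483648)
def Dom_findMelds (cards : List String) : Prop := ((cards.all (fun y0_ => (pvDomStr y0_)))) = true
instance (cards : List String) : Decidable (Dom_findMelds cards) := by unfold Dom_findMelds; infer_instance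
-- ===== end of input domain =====

-- B re-implements the runs half by a direct consecutive-window scan (two-pointer run end per start)
-- instead of A's segment-list building with a duplicated flush; objective: simpler (return value only).

-- rank of a card: int(card[0]); suit: card[1] (shared primitive extraction, exact per PySem)
def pvRank (card : String) : Int :=
  (PySem.Int.ofChars? [(PySem.Str.pyGet? card 0).getD ' ']).getD 0

def pvSuit (card : String) : Char :=
  (PySem.Str.pyGet? card 1).getD ' '

-- ===== PORT A =====

-- A's parseCard helper: (int(card[0]), card[1])
def parseCard (card : String) : Int × Char := (pvRank card, pvSuit card)

-- A's window flush: for i in range(m): for j in range(i+3, m+1): result.append(seg_cards[i:j])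
def flushA (segments : List (Int × String)) (res : List (List String)) : List (List String) :=
  let segCards := segments.map (fun p => p.2)
  let m : Int := segCards.length
  (PySem.List.pyRange 0 m 1).foldl (fun res i =>
    (PySem.List.pyRange (i + 3) (m + 1) 1).foldl (fun res j =>
      res ++ [PySem.List.slice segCards (some i) (some j)]) res) res

-- A's per-card segment step (the body of `for r, c in ranked:`)
def stepA (st : List (Int × String) × List (List String)) (rc : Int × String) :
    List (Int × String) × List (List String) :=
  if st.1 = [] then ([rc], st.2)
  else
    let prevR := ((PySem.List.pyGet? st.1 (-1)).getD (0, "")).1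
    if rc.1 = prevR + 1 then (st.1 ++ [rc], st.2)
    else if 3 ≤ st.1.length then ([rc], flushA st.1 st.2)
    else ([rc], st.2)

def findMelds (cards : List String) : List (List String) :=
  let grp := cards.foldl
    (fun (d : PySem.Dict Int (List String) × PySem.Dict Char (List String)) card =>
      let rc := parseCard card
      (d.1.modify rc.1 [] (fun l => l ++ [card]), d.2.modify rc.2 [] (fun l => l ++ [card])))
    (PySem.Dict.empty, PySem.Dict.empty)
  -- sets
  let result := grp.1.items.foldl (fun res p =>
    if p.2.length < 3 then res
    else (PySem.List.pyRange 3 ((p.2.length : Int) + 1) 1).foldl (fun res n =>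
      (PySem.List.combinations p.2 n.toNat).foldl (fun res combo => res ++ [combo]) res) res) []
  -- runs
  grp.2.items.foldl (fun res p =>
    if p.2.length < 3 then res
    else
      let ranked := PySem.List.sorted (p.2.map (fun c => ((parseCard c).1, c))) (fun x => x.1)
      let st := ranked.foldl stepA ([], res)
      if 3 ≤ st.1.length then flushA st.1 st.2 else st.2) result

-- ===== PORT B =====

-- B's while loop: j = i+1; while j < m and ranks[j] == ranks[j-1] + 1: j += 1
def runEndB (ranks : List Int) (m j : Nat) : Nat :=
  if h : j < m ∧ ranks.getD j 0 = ranks.getD (j - 1) 0 + 1 then runEndB ranks m (j + 1)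
  else j
termination_by m - j
decreasing_by omega

def findMelds_alt (cards : List String) : List (List String) :=
  let grp := cards.foldl
    (fun (d : PySem.Dict Int (List String) × PySem.Dict Char (List String)) card =>
      (d.1.modify (pvRank card) [] (fun l => l ++ [card]),
       d.2.modify (pvSuit card) [] (fun l => l ++ [card])))
    (PySem.Dict.empty, PySem.Dict.empty)
  -- sets
  let result := grp.1.values.foldl (fun res group =>
    (PySem.List.pyRange 3 ((group.length : Int) + 1) 1).foldl (fun res n =>
      (PySem.List.combinations group n.toNat).foldl (fun res combo => res ++ [combo]) res) res) []
  -- runs: consecutive-window scan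
  grp.2.values.foldl (fun res group =>
    let ranked := PySem.List.sorted group (fun c => pvRank c)
    let ranks := ranked.map (fun c => pvRank c)
    let m := ranked.length
    (PySem.List.pyRange 0 (m : Int) 1).foldl (fun res i =>
      let j := runEndB ranks m (i.toNat + 1)
      (PySem.List.pyRange (i + 3) ((j : Int) + 1) 1).foldl (fun res k =>
        res ++ [PySem.List.slice ranked (some i) (some k)]) res) res) result

-- ===== PRECONDITION & SPEC =====
-- Pre_ excludes exactly the inputs on which Python A raises: a card shorter than 2 characters
-- (IndexError on card[0]/card[1]) or whose first character is not a decimal digit (ValueError in int()).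
def Pre_findMelds (cards : List String) : Prop :=
  ∀ card ∈ cards, 2 ≤ card.toList.length ∧ (card.toList.headD ' ').isDigit = true
instance (cards : List String) : Decidable (Pre_findMelds cards) := by
  unfold Pre_findMelds; infer_instance

def pvWitness_findMelds : List String := ["3H", "4H", "5H", "5S", "5D"]

def Spec_findMelds (cards : List String) (out : List (List String)) : Prop := out = findMelds_alt cards
instance (cards : List String) (out : List (List String)) : Decidable (Spec_findMelds cards out) := by unfold Spec_findMelds; infer_instance

-- ===== CLAIM (what is proved, stated in full; the proofs are below) =====
def Claim_equal_findMelds : Prop := ∀ (cards : List String), Dom_findMelds cards → Pre_findMelds cards → Spec_findMelds cards (findMelds cards)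

-- ===== LEMMAS AND PROOFS =====

-- ---- canonical description of the emitted run windows ----

/-- A list of (rank, card) pairs is a consecutive run. -/
def IsRun (l : List (Int × String)) : Prop := List.IsChain (fun a b => b.1 = a.1 + 1) l

/-- Length of the maximal consecutive prefix. -/
def runLenP : List (Int × String) → Nat
  | [] => 0
  | [_] => 1
  | x :: y :: t => if y.1 = x.1 + 1 then runLenP (y :: t) + 1 else 1

/-- The run windows starting at the head of `q` (card lists of lengths 3 .. runLenP q). -/
def winsFrom (q : List (Int × String)) : List (List String) :=
  (List.range (runLenP q - 2)).map (fun k => (q.take (3 + k)).map (fun p => p.2))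

/-- All run windows of `P`, by ascending start position then ascending end. -/
def allWins : List (Int × String) → List (List String)
  | [] => []
  | x :: t => winsFrom (x :: t) ++ allWins t

theorem runLenP_le_length (l : List (Int × String)) : runLenP l ≤ l.length := by
  match l with
  | [] => simp [runLenP]
  | [_] => simp [runLenP]
  | x :: y :: t =>
    have := runLenP_le_length (y :: t)
    simp only [List.length_cons] at this ⊢
    simp only [runLenP]
    split <;> omega

theorem flatMap_congr_mem {α β : Type} (l : List α) (f g : α → List β)
    (h : ∀ x ∈ l, f x = g x) : l.flatMap f = l.flatMap g := by
  induction l with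
  | nil => rfl
  | cons x t ih =>
    simp only [List.flatMap_cons, h x (by simp), ih (fun y hy => h y (by simp [hy]))]

theorem runLenP_append_break (s l : List (Int × String)) (hs : s ≠ []) (hrun : IsRun s)
    (hbr : ∀ y ∈ l.head?, y.1 ≠ (s.getLast hs).1 + 1) :
    runLenP (s ++ l) = s.length := by
  induction s with
  | nil => exact absurd rfl hs
  | cons x s' ih =>
    cases s' with
    | nil =>
      cases l with
      | nil => simp [runLenP]
      | cons z t =>
        have hz : z.1 ≠ x.1 + 1 := by
          have := hbr z (by simp)
          simpa [List.getLast] using this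
        simp [runLenP, hz]
    | cons y s'' =>
      have hxy : y.1 = x.1 + 1 := (List.isChain_cons_cons.mp hrun).1
      have hrun' : IsRun (y :: s'') := (List.isChain_cons_cons.mp hrun).2
      have hlast : (y :: s'').getLast (by simp) = (x :: y :: s'').getLast hs := by
        simp [List.getLast_cons]
      have := ih (by simp) hrun' (by
        intro z hz
        rw [hlast]
        exact hbr z hz)
      simp only [List.cons_append, runLenP, if_pos hxy, List.length_cons] at this ⊢
      omega

theorem runLenP_of_run (s : List (Int × String)) (hrun : IsRun s) : runLenP s = s.length := by
  cases hs : s with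
  | nil => rfl
  | cons x t =>
    rw [← hs]
    have := runLenP_append_break s [] (by simp [hs]) hrun (by simp)
    simpa using this

theorem winsFrom_short (q : List (Int × String)) (h : q.length < 3) : winsFrom q = [] := by
  have := runLenP_le_length q
  unfold winsFrom
  have : runLenP q - 2 = 0 := by omega
  simp [this]

theorem allWins_short (P : List (Int × String)) (h : P.length < 3) : allWins P = [] := by
  induction P with
  | nil => rfl
  | cons x t ih =>
    simp only [allWins]
    rw [winsFrom_short _ (by simpa using h), ih (by simp at h ⊢; omega)]
    rfl

theorem winsFrom_append_break (s l : List (Int × String)) (hs : s ≠ []) (hrun : IsRun s)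
    (hbr : ∀ y ∈ l.head?, y.1 ≠ (s.getLast hs).1 + 1) :
    winsFrom (s ++ l) = winsFrom s := by
  unfold winsFrom
  rw [runLenP_append_break s l hs hrun hbr, runLenP_of_run s hrun]
  apply List.map_congr_left
  intro k hk
  rw [List.mem_range] at hk
  rw [List.take_append_of_le_length (by omega : 3 + k ≤ s.length)]

theorem allWins_append_break (s l : List (Int × String)) (hs : s ≠ []) (hrun : IsRun s)
    (hbr : ∀ y ∈ l.head?, y.1 ≠ (s.getLast hs).1 + 1) :
    allWins (s ++ l) = allWins s ++ allWins l := by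
  induction s with
  | nil => exact absurd rfl hs
  | cons x s' ih =>
    have hw : winsFrom ((x :: s') ++ l) = winsFrom (x :: s') :=
      winsFrom_append_break (x :: s') l hs hrun hbr
    cases s' with
    | nil =>
      have : allWins ([x] ++ l) = winsFrom ([x] ++ l) ++ allWins l := rfl
      rw [this, hw]
      show winsFrom [x] ++ allWins l = (winsFrom [x] ++ allWins []) ++ allWins l
      simp [allWins]
    | cons y s'' =>
      have hrun' : IsRun (y :: s'') := (List.isChain_cons_cons.mp hrun).2
      have hlast : (y :: s'').getLast (by simp) = (x :: y :: s'').getLast hs := by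
        simp [List.getLast_cons]
      have ht := ih (by simp) hrun' (by
        intro z hz
        rw [hlast]
        exact hbr z hz)
      simp only [List.cons_append] at hw ht ⊢
      have e1 : allWins (x :: y :: (s'' ++ l)) = winsFrom (x :: y :: (s'' ++ l)) ++ allWins (y :: (s'' ++ l)) := rfl
      have e2 : allWins (x :: y :: s'') = winsFrom (x :: y :: s'') ++ allWins (y :: s'') := rfl
      rw [e1, e2, hw, ht, List.append_assoc]

theorem allWins_eq_flatMap (P : List (Int × String)) :
    allWins P = (List.range P.length).flatMap (fun i => winsFrom (P.drop i)) := by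
  induction P with
  | nil => rfl
  | cons x t ih =>
    simp only [allWins, List.length_cons, List.range_succ_eq_map, List.flatMap_cons,
      List.flatMap_map, List.drop_zero, ih]
    rfl

theorem flatMap_single {α β : Type} (f : α → β) (l : List α) :
    l.flatMap (fun x => [f x]) = l.map f := by
  induction l with
  | nil => rfl
  | cons x t ih => simp [List.flatMap_cons, ih]

theorem IsRun_drop (s : List (Int × String)) (h : IsRun s) (i : Nat) : IsRun (s.drop i) :=
  h.suffix (List.drop_suffix i s)

/-- The shared double loop `for i in range(len(cs)): for k in range(i+3, e(i)+1): … cs[i:k]`. -/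
theorem windows_fold_eq (cs : List String) (e : Nat → Nat) (res : List (List String)) :
    (PySem.List.pyRange 0 (cs.length : Int) 1).foldl (fun res i =>
      (PySem.List.pyRange (i + 3) ((e i.toNat : Int) + 1) 1).foldl (fun res k =>
        res ++ [PySem.List.slice cs (some i) (some k)]) res) res
    = res ++ (List.range cs.length).flatMap (fun i =>
        (List.range (e i + 1 - (i + 3))).map (fun k => (cs.drop i).take (3 + k))) := by
  have hinner : ∀ (acc : List (List String)) (i : Int),
      (PySem.List.pyRange (i + 3) ((e i.toNat : Int) + 1) 1).foldl (fun res k =>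
        res ++ [PySem.List.slice cs (some i) (some k)]) acc
      = acc ++ (PySem.List.pyRange (i + 3) ((e i.toNat : Int) + 1) 1).map
          (fun k => PySem.List.slice cs (some i) (some k)) := by
    intro acc i
    rw [PySem.List.foldl_append_eq_flatMap (fun k => [PySem.List.slice cs (some i) (some k)]),
        flatMap_single]
  rw [PySem.List.foldl_congr_mem _ _
        (fun res i => res ++ (PySem.List.pyRange (i + 3) ((e i.toNat : Int) + 1) 1).map
          (fun k => PySem.List.slice cs (some i) (some k))) res
        (fun acc x _ => hinner acc x),
      PySem.List.foldl_append_eq_flatMap]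
  congr 1
  have hrange : PySem.List.pyRange 0 (cs.length : Int) 1
      = (List.range cs.length).map (fun (k : Nat) => (k : Int)) := by
    rw [PySem.List.pyRange_one]
    simp only [sub_zero, Int.toNat_natCast]
    exact List.map_congr_left (fun k _ => by simp)
  rw [hrange, List.flatMap_map]
  apply flatMap_congr_mem
  intro i _
  have ht : ((i : Int)).toNat = i := Int.toNat_natCast i
  rw [ht]
  rw [PySem.List.pyRange_one]
  have hn : (((e i : Int) + 1) - ((i : Int) + 3)).toNat = e i + 1 - (i + 3) := by omega
  rw [hn, List.map_map]
  apply List.map_congr_left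
  intro k _
  have hb : (i : Int) + 3 + (k : Int) = ((i + 3 + k : Nat) : Int) := by push_cast; ring
  simp only [Function.comp]
  rw [hb, PySem.List.slice_natCast]
  congr 1
  omega

-- ---- A's flush equals the canonical windows on a run ----

theorem flushA_eq (s : List (Int × String)) (res : List (List String)) (hrun : IsRun s) :
    flushA s res = res ++ allWins s := by
  have h := windows_fold_eq (s.map (fun p => p.2)) (fun _ => (s.map (fun p => p.2)).length) res
  refine (h.trans ?_)
  congr 1
  rw [allWins_eq_flatMap]
  simp only [List.length_map]
  apply flatMap_congr_mem
  intro i hi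
  rw [List.mem_range] at hi
  have hrl : runLenP (s.drop i) = s.length - i := by
    rw [runLenP_of_run _ (IsRun_drop s hrun i), List.length_drop]
  unfold winsFrom
  rw [hrl]
  have hn : s.length + 1 - (i + 3) = s.length - i - 2 := by omega
  rw [hn]
  apply List.map_congr_left
  intro k _
  simp [List.map_drop, List.map_take]

-- ---- A's fold with a pending run segment ----

theorem finishA_eq (l seg : List (Int × String)) (res : List (List String))
    (hseg : seg ≠ []) (hrun : IsRun seg) :
    (let st := l.foldl stepA (seg, res);
     if 3 ≤ st.1.length then flushA st.1 st.2 else st.2) = res ++ allWins (seg ++ l) := by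
  induction l generalizing seg res with
  | nil =>
    simp only [List.foldl_nil, List.append_nil]
    split
    · exact flushA_eq seg res hrun
    · next h3 =>
      rw [allWins_short seg (by omega)]
      simp
  | cons rc t ih =>
    simp only [List.foldl_cons]
    have hget : ((PySem.List.pyGet? seg (-1)).getD (0, "")).1 = (seg.getLast hseg).1 := by
      rw [PySem.List.pyGet?_neg_one, List.getLast?_eq_some_getLast hseg]
      rfl
    by_cases hc : rc.1 = (seg.getLast hseg).1 + 1
    · have hstep : stepA (seg, res) rc = (seg ++ [rc], res) := by
        simp [stepA, hseg, hget, hc]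
      rw [hstep]
      have hrun' : IsRun (seg ++ [rc]) := by
        unfold IsRun
        rw [List.isChain_append]
        refine ⟨hrun, List.isChain_singleton rc, ?_⟩
        intro x hx y hy
        rw [List.getLast?_eq_some_getLast hseg] at hx
        simp at hx hy
        subst hx; subst hy
        exact hc
      rw [ih (seg ++ [rc]) res (by simp) hrun']
      congr 2
      simp
    · have hstep : stepA (seg, res) rc
          = ([rc], if 3 ≤ seg.length then flushA seg res else res) := by
        by_cases h3 : 3 ≤ seg.length <;> simp [stepA, hseg, hget, hc, h3]
      have hres' : (if 3 ≤ seg.length then flushA seg res else res) = res ++ allWins seg := by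
        split
        · exact flushA_eq seg res hrun
        · next h3 =>
          rw [allWins_short seg (by omega)]
          simp
      rw [hstep, hres', ih [rc] _ (by simp) (List.isChain_singleton rc)]
      rw [allWins_append_break seg (rc :: t) hseg hrun (by
        intro y hy
        simp at hy
        subst hy
        exact hc)]
      simp

-- ---- B's while loop computes the maximal run end ----

theorem runEndB_eq (P : List (Int × String)) (i : Nat) (hi : i < P.length) :
    runEndB (P.map (fun p => p.1)) P.length (i + 1) = i + runLenP (P.drop i) := by
  rw [runEndB]
  have hd : P.drop i = P[i] :: P.drop (i + 1) := List.drop_eq_getElem_cons hi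
  by_cases hi1 : i + 1 < P.length
  · have hd1 : P.drop (i + 1) = P[i + 1] :: P.drop (i + 2) := List.drop_eq_getElem_cons hi1
    have hga : (P.map (fun p => p.1)).getD (i + 1) 0 = P[i + 1].1 := by
      simp [List.getD, List.getElem?_eq_getElem hi1]
    have hgb : (P.map (fun p => p.1)).getD (i + 1 - 1) 0 = P[i].1 := by
      simp [List.getD, List.getElem?_eq_getElem hi]
    by_cases hr : P[i + 1].1 = P[i].1 + 1
    · rw [dif_pos ⟨hi1, by rw [hga, hgb, hr]⟩]
      rw [runEndB_eq P (i + 1) hi1]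
      rw [hd, hd1, runLenP, if_pos hr, ← hd1]
      omega
    · rw [dif_neg (by
        rw [hga, hgb]
        intro h
        exact hr h.2)]
      rw [hd, hd1, runLenP, if_neg hr]
  · have : P.drop (i + 1) = [] := List.drop_eq_nil_of_le (by omega)
    rw [dif_neg (by intro h; omega)]
    rw [hd, this, runLenP]
termination_by P.length - i
decreasing_by omega

-- ---- stable sort commutes with mapping a key-factoring function ----

theorem insertBy_map {α β : Type} (f : α → β) (b : β → β → Bool) (x : α) (acc : List α) :
    PySem.List.insertBy b (f x) (acc.map f)
      = (PySem.List.insertBy (fun u v => b (f u) (f v)) x acc).map f := by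
  induction acc with
  | nil => rfl
  | cons y t ih =>
    simp only [List.map_cons, PySem.List.insertBy]
    split <;> simp_all

theorem sorted_map_factor {α β : Type} (f : α → β) (key : β → Int) (l : List α) :
    PySem.List.sorted (l.map f) key false
      = (PySem.List.sorted l (fun a => key (f a)) false).map f := by
  simp only [PySem.List.sorted, List.foldl_map, if_neg (by decide : ¬ (false = true))]
  have : ∀ (l : List α) (acc : List α),
      List.foldl (fun acc x => PySem.List.insertBy (fun u v => decide (key u < key v)) (f x) acc)
        (acc.map f) l
      = (List.foldl (fun acc x =>
          PySem.List.insertBy (fun u v => decide (key (f u) < key (f v))) x acc) acc l).map f := by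
    intro l
    induction l with
    | nil => intro acc; rfl
    | cons x t ih =>
      intro acc
      simp only [List.foldl_cons]
      rw [insertBy_map f (fun u v => decide (key u < key v)) x acc, ih]
  simpa using this l []

-- ---- per-suit bodies ----

def pairsOf (g : List String) : List (Int × String) :=
  PySem.List.sorted (g.map (fun c => (pvRank c, c))) (fun x => x.1)

theorem runsA_body (g : List String) (res : List (List String)) :
    (if g.length < 3 then res
     else
       let ranked := PySem.List.sorted (g.map (fun c => ((parseCard c).1, c))) (fun x => x.1)
       let st := ranked.foldl stepA ([], res)
       if 3 ≤ st.1.length then flushA st.1 st.2 else st.2)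
    = res ++ allWins (pairsOf g) := by
  have hlen : (pairsOf g).length = g.length := by
    unfold pairsOf
    rw [PySem.List.length_sorted]
    simp
  have hp : PySem.List.sorted (g.map (fun c => ((parseCard c).1, c))) (fun x => x.1)
      = pairsOf g := rfl
  split
  · next hlt =>
    rw [allWins_short (pairsOf g) (by omega)]
    simp
  · next hge =>
    simp only [hp]
    cases hpg : pairsOf g with
    | nil =>
      rw [hpg] at hlen
      simp at hlen
      omega
    | cons x t =>
      simp only [List.foldl_cons]
      have hx : stepA ([], res) x = ([x], res) := by simp [stepA]
      rw [hx]
      have := finishA_eq t [x] res (by simp) (List.isChain_singleton x)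
      simpa using this

theorem runsB_body (g : List String) (res : List (List String)) :
    (let ranked := PySem.List.sorted g (fun c => pvRank c)
     let ranks := ranked.map (fun c => pvRank c)
     let m := ranked.length
     (PySem.List.pyRange 0 (m : Int) 1).foldl (fun res i =>
       let j := runEndB ranks m (i.toNat + 1)
       (PySem.List.pyRange (i + 3) ((j : Int) + 1) 1).foldl (fun res k =>
         res ++ [PySem.List.slice ranked (some i) (some k)]) res) res)
    = res ++ allWins (pairsOf g) := by
  have hP : pairsOf g = (PySem.List.sorted g (fun c => pvRank c)).map (fun c => (pvRank c, c)) :=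
    sorted_map_factor (fun c => (pvRank c, c)) (fun p => p.1) g
  have h := windows_fold_eq (PySem.List.sorted g (fun c => pvRank c))
    (fun n => runEndB ((PySem.List.sorted g (fun c => pvRank c)).map (fun c => pvRank c))
      (PySem.List.sorted g (fun c => pvRank c)).length (n + 1)) res
  refine h.trans ?_
  congr 1
  rw [allWins_eq_flatMap]
  have hlen : (pairsOf g).length = (PySem.List.sorted g (fun c => pvRank c)).length := by
    rw [hP]; simp
  rw [hlen]
  apply flatMap_congr_mem
  intro i hi
  rw [List.mem_range] at hi
  have hranks : (PySem.List.sorted g (fun c => pvRank c)).map (fun c => pvRank c)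
      = (pairsOf g).map (fun p => p.1) := by
    rw [hP]; simp
  have hre := runEndB_eq (pairsOf g) i (by omega)
  rw [hranks, ← hlen, hre]
  unfold winsFrom
  have hn : i + runLenP ((pairsOf g).drop i) + 1 - (i + 3) = runLenP ((pairsOf g).drop i) - 2 := by
    omega
  rw [hn]
  apply List.map_congr_left
  intro k _
  rw [hP]
  simp [Function.comp_def]

-- ---- the two halves, fold by fold ----

theorem sets_fold_eq (d : PySem.Dict Int (List String)) :
    d.items.foldl (fun res p =>
      if p.2.length < 3 then res
      else (PySem.List.pyRange 3 ((p.2.length : Int) + 1) 1).foldl (fun res n =>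
        (PySem.List.combinations p.2 n.toNat).foldl (fun res combo => res ++ [combo]) res) res) []
    = d.values.foldl (fun res group =>
      (PySem.List.pyRange 3 ((group.length : Int) + 1) 1).foldl (fun res n =>
        (PySem.List.combinations group n.toNat).foldl (fun res combo => res ++ [combo]) res) res) [] := by
  rw [show d.values = d.items.map (fun p => p.2) from rfl, List.foldl_map]
  apply PySem.List.foldl_congr_mem
  intro acc p _
  split
  · next hlt =>
    rw [PySem.List.pyRange_one_eq_nil (by omega : ((p.2.length : Int) + 1) ≤ 3)]
    rfl
  · rfl

theorem runs_fold_eq (d : PySem.Dict Char (List String)) (r0 : List (List String)) :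
    d.items.foldl (fun res p =>
      if p.2.length < 3 then res
      else
        let ranked := PySem.List.sorted (p.2.map (fun c => ((parseCard c).1, c))) (fun x => x.1)
        let st := ranked.foldl stepA ([], res)
        if 3 ≤ st.1.length then flushA st.1 st.2 else st.2) r0
    = d.values.foldl (fun res group =>
      let ranked := PySem.List.sorted group (fun c => pvRank c)
      let ranks := ranked.map (fun c => pvRank c)
      let m := ranked.length
      (PySem.List.pyRange 0 (m : Int) 1).foldl (fun res i =>
        let j := runEndB ranks m (i.toNat + 1)
        (PySem.List.pyRange (i + 3) ((j : Int) + 1) 1).foldl (fun res k =>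
          res ++ [PySem.List.slice ranked (some i) (some k)]) res) res) r0 := by
  rw [show d.values = d.items.map (fun p => p.2) from rfl, List.foldl_map]
  apply PySem.List.foldl_congr_mem
  intro acc p _
  exact (runsA_body p.2 acc).trans (runsB_body p.2 acc).symm

theorem post_eq (grp : PySem.Dict Int (List String) × PySem.Dict Char (List String)) :
    grp.2.items.foldl (fun res p =>
      if p.2.length < 3 then res
      else
        let ranked := PySem.List.sorted (p.2.map (fun c => ((parseCard c).1, c))) (fun x => x.1)
        let st := ranked.foldl stepA ([], res)
        if 3 ≤ st.1.length then flushA st.1 st.2 else st.2)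
      (grp.1.items.foldl (fun res p =>
        if p.2.length < 3 then res
        else (PySem.List.pyRange 3 ((p.2.length : Int) + 1) 1).foldl (fun res n =>
          (PySem.List.combinations p.2 n.toNat).foldl (fun res combo => res ++ [combo]) res) res) [])
    = grp.2.values.foldl (fun res group =>
      let ranked := PySem.List.sorted group (fun c => pvRank c)
      let ranks := ranked.map (fun c => pvRank c)
      let m := ranked.length
      (PySem.List.pyRange 0 (m : Int) 1).foldl (fun res i =>
        let j := runEndB ranks m (i.toNat + 1)
        (PySem.List.pyRange (i + 3) ((j : Int) + 1) 1).foldl (fun res k =>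
          res ++ [PySem.List.slice ranked (some i) (some k)]) res) res)
      (grp.1.values.foldl (fun res group =>
        (PySem.List.pyRange 3 ((group.length : Int) + 1) 1).foldl (fun res n =>
          (PySem.List.combinations group n.toNat).foldl (fun res combo => res ++ [combo]) res) res) []) := by
  rw [sets_fold_eq grp.1]
  exact runs_fold_eq grp.2 _

-- ===== VERDICT (by name: the statement is the Claim_ definition above) =====
theorem findMelds_spec : Claim_equal_findMelds := by
  intro cards _dom _pre
  show findMelds cards = findMelds_alt cards
  exact post_eq (cards.foldl
    (fun (d : PySem.Dict Int (List String) × PySem.Dict Char (List String)) card =>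
      (d.1.modify (pvRank card) [] (fun l => l ++ [card]),
       d.2.modify (pvSuit card) [] (fun l => l ++ [card])))
    (PySem.Dict.empty, PySem.Dict.empty))
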